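-- pv_equiv track=rewrite | github.com/dr-lamia/AI_dental_lifestyle | streamlit_app_behaviors.py | build_group_map
-- ===== SOURCE A (Python) =====
-- def build_group_map(feature_names, num_cols, cat_cols):
--     group_map = {}
--     for i, name in enumerate(feature_names):
--         if name.startswith("num__"):
--             orig = name[len("num__"):]
--         elif name.startswith("cat__"):
--             orig = None
--             for c in cat_cols:
--                 prefix = f"cat__{c}_"
--                 if name.startswith(prefix):
--                     orig = c
--                     break
--             if orig is None:
--                 orig = name
--         else:
--             orig = name
--         group_map.setdefault(orig, []).append(i)
--     return group_map
-- ===== SOURCE B (Python) =====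
-- def build_group_map(feature_names, num_cols, cat_cols):
--     def origin(name):
--         if name.startswith("num__"):
--             return name[5:]
--         if name.startswith("cat__"):
--             return next((c for c in cat_cols if name.startswith(f"cat__{c}_")), name)
--         return name
--
--     origins = [origin(n) for n in feature_names]
--     keys = list(dict.fromkeys(origins))
--     return {k: [i for i, o in enumerate(origins) if o == k] for k in keys}
-- ===== Notes on version B (the rewrite author's own statement) =====
-- stated objective: alternative
-- what changed: Replaces the single interleaved loop that accumulates indices into a dict via setdefault-append with two separate passes: first resolve every feature name to its origin key (using next/find over cat_cols instead of a break loop), then build the result as a dict comprehension over the first-occurrence-deduplicated keys, collecting each key's indices by a scan over the origins list.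
import Mathlib
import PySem

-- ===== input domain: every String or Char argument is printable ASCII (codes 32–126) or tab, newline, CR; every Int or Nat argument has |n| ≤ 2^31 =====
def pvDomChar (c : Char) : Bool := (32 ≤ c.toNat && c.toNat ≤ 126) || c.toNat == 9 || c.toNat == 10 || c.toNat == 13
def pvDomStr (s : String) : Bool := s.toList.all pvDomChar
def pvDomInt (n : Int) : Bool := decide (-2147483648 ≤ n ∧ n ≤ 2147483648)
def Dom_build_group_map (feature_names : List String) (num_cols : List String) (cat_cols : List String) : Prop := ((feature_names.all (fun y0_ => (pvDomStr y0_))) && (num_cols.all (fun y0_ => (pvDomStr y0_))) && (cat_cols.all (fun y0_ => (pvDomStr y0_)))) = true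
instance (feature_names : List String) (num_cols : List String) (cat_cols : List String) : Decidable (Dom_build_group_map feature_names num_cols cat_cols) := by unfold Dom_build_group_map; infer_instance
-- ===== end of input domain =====

-- B splits A's interleaved setdefault-append loop into two passes: resolve every name to
-- its origin key, then build the grouping per distinct key (alternative decomposition).

-- ===== PORT A =====
-- inner 'for c in cat_cols: … break' loop of A
def pvAFindCat (name : String) : List String → Option String
  | [] => none
  | c :: rest =>
      if PySem.Str.startswith name ("cat__" ++ c ++ "_") then some c
      else pvAFindCat name rest

def build_group_map (feature_names : List String) (num_cols : List String) (cat_cols : List String) : List (String × List Int) :=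
  ((PySem.List.enumerate feature_names 0).foldl (fun d (p : Int × String) =>
      let name := p.2
      let orig : String :=
        if PySem.Str.startswith name "num__" then PySem.Str.slice name (some 5) none
        else if PySem.Str.startswith name "cat__" then
          match pvAFindCat name cat_cols with
          | some c => c
          | none => name
        else name
      d.modify orig [] (fun v => v ++ [p.1])) PySem.Dict.empty).items

-- ===== PORT B =====
-- B's resolver: num__ prefix stripped, else first matching cat column via find?, else the name itself
def pvBOrigin (cat_cols : List String) (name : String) : String :=
  if PySem.Str.startswith name "num__" then PySem.Str.slice name (some 5) none
  else if PySem.Str.startswith name "cat__" then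
    (cat_cols.find? (fun c => PySem.Str.startswith name ("cat__" ++ c ++ "_"))).getD name
  else name

def build_group_map_alt (feature_names : List String) (num_cols : List String) (cat_cols : List String) : List (String × List Int) :=
  let origins := feature_names.map (pvBOrigin cat_cols)
  let keys := PySem.List.dedup origins
  keys.map (fun k =>
    (k, ((PySem.List.enumerate origins 0).filter (fun p => p.2 == k)).map (fun p => p.1)))

-- ===== PRECONDITION & SPEC =====
def Spec_build_group_map (feature_names : List String) (num_cols : List String) (cat_cols : List String) (out : List (String × List Int)) : Prop := out = build_group_map_alt feature_names num_cols cat_cols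
instance (feature_names : List String) (num_cols : List String) (cat_cols : List String) (out : List (String × List Int)) : Decidable (Spec_build_group_map feature_names num_cols cat_cols out) := by unfold Spec_build_group_map; infer_instance

-- ===== CLAIM (what is proved, stated in full; the proofs are below) =====
def Claim_equal_build_group_map : Prop := ∀ (feature_names : List String) (num_cols : List String) (cat_cols : List String), Dom_build_group_map feature_names num_cols cat_cols → Spec_build_group_map feature_names num_cols cat_cols (build_group_map feature_names num_cols cat_cols)

-- ===== LEMMAS AND PROOFS =====

-- A's break-loop over cat_cols is List.find?
theorem pvAFindCat_eq_find? (name : String) (cs : List String) :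
    pvAFindCat name cs = cs.find? (fun c => PySem.Str.startswith name ("cat__" ++ c ++ "_")) := by
  induction cs with
  | nil => rfl
  | cons c rest ih =>
      simp only [pvAFindCat, List.find?_cons, ih]
      cases PySem.Str.startswith name ("cat__" ++ c ++ "_") <;> rfl

-- A's inline origin computation is B's resolver
theorem pvA_orig_eq (cat_cols : List String) (name : String) :
    (if PySem.Str.startswith name "num__" then PySem.Str.slice name (some 5) none
     else if PySem.Str.startswith name "cat__" then
       match pvAFindCat name cat_cols with
       | some c => c
       | none => name
     else name) = pvBOrigin cat_cols name := by
  unfold pvBOrigin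
  rw [pvAFindCat_eq_find?]
  cases h : List.find? (fun c => PySem.Str.startswith name ("cat__" ++ c ++ "_")) cat_cols <;>
    simp [Option.getD]

-- enumerate commutes with map on the elements
theorem enumerate_map {α β : Type} (f : α → β) (xs : List α) (s : Int) :
    PySem.List.enumerate (xs.map f) s = (PySem.List.enumerate xs s).map (fun p => (p.1, f p.2)) := by
  induction xs generalizing s with
  | nil => simp [PySem.List.enumerate_nil]
  | cons x xs ih => simp [PySem.List.enumerate_cons, ih]

theorem build_group_map_spec : Claim_equal_build_group_map := by
  intro fns num_cols cat_cols _
  unfold Spec_build_group_map build_group_map build_group_map_alt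
  -- rewrite A's fold to use B's resolver as key function
  have hfun : (fun (d : PySem.Dict String (List Int)) (p : Int × String) =>
      let name := p.2
      let orig : String :=
        if PySem.Str.startswith name "num__" then PySem.Str.slice name (some 5) none
        else if PySem.Str.startswith name "cat__" then
          match pvAFindCat name cat_cols with
          | some c => c
          | none => name
        else name
      d.modify orig [] (fun v => v ++ [p.1])) =
      (fun d p => d.modify (pvBOrigin cat_cols p.2) [] (fun v => v ++ [p.1])) := by
    funext d p
    simp only [pvA_orig_eq]
  rw [hfun]
  set E := PySem.List.enumerate fns 0 with hE
  set g := pvBOrigin cat_cols with hg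
  -- A's dict
  set D := E.foldl (fun d p => d.modify (g p.2) [] (fun v => v ++ [p.1])) PySem.Dict.empty with hD
  have hnodup : D.keys.Nodup := by
    rw [hD]
    exact PySem.Dict.nodup_keys_foldl_modify_key E (fun p => g p.2) _ _ _ PySem.Dict.nodup_keys_empty
  have hkeys : D.keys = PySem.Set.ofList (fns.map g) := by
    rw [hD, PySem.Dict.keys_foldl_modify_key]
    have : E.map (fun p => g p.2) = fns.map g := by
      rw [hE]
      conv_rhs => rw [← PySem.List.map_snd_enumerate fns 0]
      rw [List.map_map]
      rfl
    rw [this]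
    simp [PySem.Set.update, PySem.Dict.keys_empty, PySem.Set.ofList_eq_foldl]
  have hgetD : ∀ k, D.getD k [] =
      ((PySem.List.enumerate (fns.map g) 0).filter (fun p => p.2 == k)).map (fun p => p.1) := by
    intro k
    have hfold : D = (E.map (fun p => ((g p.2 : String), p.1))).foldl
        (fun d q => d.modify q.1 [] (fun v => v ++ [q.2])) PySem.Dict.empty := by
      rw [hD, List.foldl_map]
    rw [hfold, PySem.Dict.getD_foldl_modify_append, PySem.Dict.getD_empty]
    rw [enumerate_map]
    simp only [List.filter_map, List.map_map, List.nil_append]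
    rfl
  have hitems : D.items = D.keys.map (fun k => (k, D.getD k [])) :=
    PySem.Dict.items_eq_map_keys D hnodup []
  rw [hitems, hkeys]
  simp only [PySem.List.dedup_eq_ofList]
  apply List.map_congr_left
  intro k _
  rw [hgetD k]

-- ===== VERDICT (by name: the statement is the Claim_ definition above) =====
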